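-- pv_equiv track=rewrite | github.com/schwa456/thesis_refactored | src/modules/filters/stacked_filter.py | _nodes_to_subgraph
-- ===== SOURCE A (Python) =====
-- from typing import Dict, List, Any
--
-- def _nodes_to_subgraph(nodes: List[str]) -> Dict[str, List[str]]:
--     out: Dict[str, List[str]] = {}
--     for n in nodes:
--         if "." not in n:
--             out.setdefault(n, [])
--             continue
--         t, c = n.split(".", 1)
--         out.setdefault(t, [])
--         if c not in out[t]:
--             out[t].append(c)
--     return out
-- ===== SOURCE B (Python) =====
-- from typing import Dict, List
--
--
-- def _nodes_to_subgraph(nodes: List[str]) -> Dict[str, List[str]]: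
--     # Distinct tables in first-seen order, then one full rescan per table
--     # collecting that table's column suffixes (deduped, first-seen order).
--     tables = list(dict.fromkeys(n.split(".", 1)[0] for n in nodes))
--     return {t: list(dict.fromkeys(n.split(".", 1)[1]
--                                   for n in nodes
--                                   if "." in n and n.split(".", 1)[0] == t))
--             for t in tables}
-- ===== Notes on version B (the rewrite author's own statement) =====
-- stated objective: alternative
-- what changed: A builds the dict incrementally in one pass, mutating per-table lists with an inline 'c not in out[t]' membership check; B never mutates a dict: it first extracts the distinct table list, then for each table makes a separate full rescan of the input collecting and deduping that table's suffixes (per-table group-by-rescan instead of a single accumulating pass).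
import Mathlib
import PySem

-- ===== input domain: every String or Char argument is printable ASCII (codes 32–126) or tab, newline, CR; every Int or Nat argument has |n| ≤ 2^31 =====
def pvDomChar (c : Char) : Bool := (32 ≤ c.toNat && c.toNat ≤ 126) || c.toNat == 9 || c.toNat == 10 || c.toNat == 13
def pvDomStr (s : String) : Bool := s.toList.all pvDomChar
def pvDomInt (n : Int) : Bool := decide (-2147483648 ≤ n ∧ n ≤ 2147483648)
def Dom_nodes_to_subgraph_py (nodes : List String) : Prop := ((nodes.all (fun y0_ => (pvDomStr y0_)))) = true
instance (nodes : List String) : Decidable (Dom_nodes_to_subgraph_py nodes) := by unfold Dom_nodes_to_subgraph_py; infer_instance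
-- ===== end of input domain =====

-- B replaces A's single accumulating-dict pass (with an inline 'c not in out[t]' branch) by a
-- per-table group-by-rescan: distinct tables first, then one filtered scan per table; same value.

-- ===== PORT A =====
-- body of A's for-loop, as a named helper
def pvStepA (d : PySem.Dict String (List String)) (n : String) : PySem.Dict String (List String) :=
  if PySem.Str.isIn "." n = false then
    d.setdefault n []                                  -- "." not in n: out.setdefault(n, []); continue
  else
    match PySem.Str.splitMax? n "." 1 with             -- t, c = n.split(".", 1)
    | some [t, c] =>
        let d' := d.setdefault t []                    -- out.setdefault(t, [])
        if c ∉ d'.getD t [] then d'.insert t (d'.getD t [] ++ [c])   -- if c not in out[t]: out[t].append(c)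
        else d'
    | _ => d                                           -- unreachable: split(".",1) yields 2 parts when "." in n

def nodes_to_subgraph_py (nodes : List String) : List (String × List String) :=
  (nodes.foldl pvStepA PySem.Dict.empty).items

-- ===== PORT B =====
-- n.split(".", 1)[0]  (the fallback arms are unreachable: split(".",1) yields 1 or 2 parts)
def pvHead (n : String) : String :=
  match PySem.Str.splitMax? n "." 1 with
  | some (t :: _) => t
  | _ => ""

-- n.split(".", 1)[1]  (only evaluated when "." in n; fallback arms unreachable there)
def pvTail (n : String) : String :=
  match PySem.Str.splitMax? n "." 1 with
  | some (_ :: c :: _) => c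
  | _ => ""

-- the generator  (n.split(".",1)[1] for n in nodes if "." in n and n.split(".",1)[0] == t)
def pvSufs (nodes : List String) (t : String) : List String :=
  (nodes.filter (fun n => PySem.Str.isIn "." n && (pvHead n == t))).map pvTail

def nodes_to_subgraph_py_alt (nodes : List String) : List (String × List String) :=
  -- tables = list(dict.fromkeys(...)); then the dict comprehension over tables
  (PySem.List.dedup (nodes.map pvHead)).map
    (fun t => (t, PySem.List.dedup (pvSufs nodes t)))

-- ===== PRECONDITION & SPEC =====
def Spec_nodes_to_subgraph_py (nodes : List String) (out : List (String × List String)) : Prop := out = nodes_to_subgraph_py_alt nodes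
instance (nodes : List String) (out : List (String × List String)) : Decidable (Spec_nodes_to_subgraph_py nodes out) := by unfold Spec_nodes_to_subgraph_py; infer_instance

-- ===== CLAIM (what is proved, stated in full; the proofs are below) =====
def Claim_equal_nodes_to_subgraph_py : Prop := ∀ (nodes : List String), Dom_nodes_to_subgraph_py nodes → Spec_nodes_to_subgraph_py nodes (nodes_to_subgraph_py nodes)

-- ===== LEMMAS AND PROOFS =====

-- ---- characterising n.split(".", 1) ----

theorem pv_go_zero (sep : List Char) (fuel : Nat) (l cur : List Char) (acc : List (List Char)) :
    PySem.Chars.splitOnMax.go sep fuel 0 l cur acc = ((cur.reverse ++ l) :: acc).reverse := by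
  cases fuel with
  | zero => rw [PySem.Chars.splitOnMax.go.eq_def]
  | succ f => cases l <;> rw [PySem.Chars.splitOnMax.go.eq_def] <;> simp

theorem pv_go_one_no_dot (l : List Char) : ∀ (fuel : Nat) (cur : List Char) (acc : List (List Char)), '.' ∉ l →
    PySem.Chars.splitOnMax.go ['.'] fuel 1 l cur acc = ((cur.reverse ++ l) :: acc).reverse := by
  induction l with
  | nil => intro fuel cur acc _; cases fuel with
    | zero => rw [PySem.Chars.splitOnMax.go.eq_def]
    | succ f => rw [PySem.Chars.splitOnMax.go.eq_def]; simp
  | cons c rest ih =>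
    intro fuel cur acc h
    rw [List.mem_cons, not_or] at h
    have hc : ('.' == c) = false := by
      simp only [beq_eq_false_iff_ne, ne_eq]
      exact h.1
    cases fuel with
    | zero => rw [PySem.Chars.splitOnMax.go.eq_def]
    | succ f =>
      rw [PySem.Chars.splitOnMax.go.eq_def]
      simp only [List.isPrefixOf, hc, Bool.false_and, Nat.succ_ne_zero, if_false]
      rw [ih f (c :: cur) acc h.2]
      simp

theorem pv_go_one_dot (pre : List Char) : ∀ (post : List Char) (fuel : Nat) (cur : List Char) (acc : List (List Char)),
    '.' ∉ pre → pre.length < fuel →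
    PySem.Chars.splitOnMax.go ['.'] fuel 1 (pre ++ '.' :: post) cur acc
      = (post :: (cur.reverse ++ pre) :: acc).reverse := by
  induction pre with
  | nil =>
    intro post fuel cur acc _ hf
    cases fuel with
    | zero => omega
    | succ f =>
      rw [PySem.Chars.splitOnMax.go.eq_def]
      simp only [List.nil_append, List.isPrefixOf, BEq.rfl, Bool.true_and, Nat.succ_ne_zero,
        if_false, if_true]
      rw [pv_go_zero]
      simp
  | cons c rest ih =>
    intro post fuel cur acc h hf
    rw [List.mem_cons, not_or] at h
    have hc : ('.' == c) = false := by
      simp only [beq_eq_false_iff_ne, ne_eq]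
      exact h.1
    cases fuel with
    | zero => simp at hf
    | succ f =>
      rw [PySem.Chars.splitOnMax.go.eq_def]
      simp only [List.cons_append, List.isPrefixOf, hc, Bool.false_and, Nat.succ_ne_zero, if_false]
      rw [ih post f (c :: cur) acc h.2 (by simp at hf; omega)]
      simp

theorem pv_split_no_dot (n : String) (h : '.' ∉ n.toList) :
    PySem.Str.splitMax? n "." 1 = some [n] := by
  unfold PySem.Str.splitMax? PySem.Chars.splitMax? PySem.Chars.splitOnMax
  norm_num
  refine ⟨[n.toList], ⟨by simp, ?_⟩, n.toList, rfl, by simp⟩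
  rw [show (".".toList) = ['.'] from rfl, pv_go_one_no_dot n.toList _ [] [] h]
  simp

theorem pv_split_dot (n : String) (h : '.' ∈ n.toList) :
    ∃ t c : List Char, n.toList = t ++ '.' :: c ∧ '.' ∉ t ∧
      PySem.Str.splitMax? n "." 1 = some [String.ofList t, String.ofList c] := by
  have hdw : n.toList.dropWhile (fun x => x != '.') ≠ [] := by
    intro e
    rw [List.dropWhile_eq_nil_iff] at e
    have := e _ h
    simp at this
  rcases hq : n.toList.dropWhile (fun x => x != '.') with _ | ⟨a, tl⟩
  · exact absurd hq hdw
  · have ha : a = '.' := by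
      have := List.head_dropWhile_not (fun x => x != '.') hdw
      simp only [hq, List.head_cons] at this
      simpa using this
    have hdecomp : n.toList = n.toList.takeWhile (fun x => x != '.') ++ '.' :: tl := by
      conv_lhs => rw [← List.takeWhile_append_dropWhile (p := fun x => x != '.') (l := n.toList)]
      rw [hq, ha]
    have hpre : '.' ∉ n.toList.takeWhile (fun x => x != '.') := by
      intro hm
      have := List.mem_takeWhile_imp hm
      simp at this
    refine ⟨_, tl, hdecomp, hpre, ?_⟩
    unfold PySem.Str.splitMax? PySem.Chars.splitMax? PySem.Chars.splitOnMax
    norm_num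
    refine ⟨[n.toList.takeWhile (fun x => x != '.'), tl], ⟨by simp, ?_⟩, by simp⟩
    conv_lhs => rw [hdecomp]
    rw [show (".".toList) = ['.'] from rfl, pv_go_one_dot _ _ _ _ _ hpre ?_]
    · simp
    · have h1 := (List.takeWhile_prefix (p := fun x => x != '.') (l := n.toList)).length_le
      have h2 : n.toList.length = n.length := by simp
      omega

theorem pv_isIn_false_iff (n : String) : PySem.Str.isIn "." n = false ↔ '.' ∉ n.toList := by
  unfold PySem.Str.isIn
  rw [show (".".toList) = ['.'] from rfl, PySem.Chars.isIn_eq_false_iff]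
  constructor
  · intro hinf hm
    obtain ⟨s', t', e⟩ := List.append_of_mem hm
    exact hinf ⟨s', t', by rw [e]; simp⟩
  · rintro hm ⟨s', t', e⟩
    exact hm (by rw [← e]; simp)

theorem pv_head_no_dot (n : String) (h : '.' ∉ n.toList) : pvHead n = n := by
  unfold pvHead
  rw [pv_split_no_dot n h]

-- ---- dedup and suffix-list step facts ----

theorem pv_dedup_append_singleton {α : Type} [DecidableEq α] (v : List α) (c : α) :
    PySem.List.dedup (v ++ [c])
      = if c ∈ v then PySem.List.dedup v else PySem.List.dedup v ++ [c] := by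
  rw [PySem.List.dedup_eq_ofList, PySem.List.dedup_eq_ofList,
    PySem.Set.ofList_eq_foldl, PySem.Set.ofList_eq_foldl, List.foldl_append]
  simp only [List.foldl_cons, List.foldl_nil]
  rw [← PySem.Set.ofList_eq_foldl]
  by_cases hc : c ∈ v
  · have : (PySem.Set.ofList v).contains c = true :=
      (PySem.Set.contains_iff _ _).mpr ((PySem.Set.mem_ofList _ _).mpr hc)
    simp [PySem.Set.add, hc]
  · have : (PySem.Set.ofList v).contains c = false := by
      rw [Bool.eq_false_iff]
      intro e
      exact hc ((PySem.Set.mem_ofList _ _).mp ((PySem.Set.contains_iff _ _).mp e))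
    simp [PySem.Set.add, hc]

theorem pv_sufs_append (ns : List String) (n t : String) :
    pvSufs (ns ++ [n]) t
      = pvSufs ns t ++ (if PySem.Str.isIn "." n && (pvHead n == t) then [pvTail n] else []) := by
  unfold pvSufs
  rw [List.filter_append, List.map_append]
  congr 1
  rw [List.filter_singleton]
  cases h : (PySem.Str.isIn "." n && (pvHead n == t)) with
  | false => simp
  | true => simp

theorem pv_sufs_nil_of_not_mem (ns : List String) (t : String) (h : t ∉ ns.map pvHead) :
    pvSufs ns t = [] := by
  unfold pvSufs
  rw [List.map_eq_nil_iff, List.filter_eq_nil_iff]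
  intro n hn hp
  rw [Bool.and_eq_true, beq_iff_eq] at hp
  exact h (hp.2 ▸ List.mem_map_of_mem hn)

-- ---- the main invariant: A's fold, itemised, IS B's per-table table ----

theorem pv_fold_items (nodes : List String) :
    (nodes.foldl pvStepA PySem.Dict.empty).items
      = (PySem.List.dedup (nodes.map pvHead)).map
          (fun t => (t, PySem.List.dedup (pvSufs nodes t))) := by
  induction nodes using List.reverseRecOn with
  | nil => rfl
  | append_singleton ns n ih =>
    rw [List.foldl_append, List.foldl_cons, List.foldl_nil]
    set d := ns.foldl pvStepA PySem.Dict.empty with hd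
    have hkeys : d.keys = PySem.List.dedup (ns.map pvHead) := by
      show d.items.map Prod.fst = _
      rw [ih, List.map_map]
      simp [Function.comp_def]
    have hnodup : d.keys.Nodup := by
      rw [hkeys]; exact PySem.List.nodup_dedup _
    have hcontains : ∀ s : String, d.contains s = decide (s ∈ ns.map pvHead) := by
      intro s
      rw [PySem.Dict.contains_eq_decide_mem_keys, hkeys]
      by_cases hm : s ∈ ns.map pvHead
      · simp [hm]
      · simp only [hm, decide_false, decide_eq_false_iff_not]
        exact fun hx => hm ((PySem.List.mem_dedup _ _).mp hx)
    rw [List.map_append, List.map_singleton]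
    by_cases hdot : '.' ∈ n.toList
    · -- n has a dot: split = [t, c]
      obtain ⟨tl, cl, _, _, hs⟩ := pv_split_dot n hdot
      have hInT : PySem.Str.isIn "." n = true := by
        cases hb : PySem.Str.isIn "." n with
        | false => exact absurd ((pv_isIn_false_iff n).mp hb) (by simpa using hdot)
        | true => rfl
      have hhead : pvHead n = String.ofList tl := by unfold pvHead; rw [hs]
      have htail : pvTail n = String.ofList cl := by unfold pvTail; rw [hs]
      set t := String.ofList tl
      set c := String.ofList cl
      have hstep : pvStepA d n
          = (let d' := d.setdefault t []
             if c ∉ d'.getD t [] then d'.insert t (d'.getD t [] ++ [c]) else d') := by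
        unfold pvStepA
        rw [hs, if_neg (by rw [hInT]; simp)]
      have hsufs : ∀ t', pvSufs (ns ++ [n]) t'
          = pvSufs ns t' ++ (if t' = t then [c] else []) := by
        intro t'
        rw [pv_sufs_append, hInT, hhead, htail]
        by_cases he : t' = t
        · simp [he]
        · simp [he, Ne.symm he]
      by_cases hmem : t ∈ ns.map pvHead
      · -- existing table
        have hcon : d.contains t = true := by rw [hcontains]; simp [hmem]
        have hsd : d.setdefault t [] = d := PySem.Dict.setdefault_of_contains _ _ hcon
        have hti : (t, PySem.List.dedup (pvSufs ns t)) ∈ d.items := by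
          rw [ih]
          exact List.mem_map_of_mem ((PySem.List.mem_dedup _ _).mpr hmem)
        have hgd : d.getD t [] = PySem.List.dedup (pvSufs ns t) :=
          PySem.Dict.getD_of_mem_items _ hti hnodup []
        have htabs : PySem.List.dedup (ns.map pvHead ++ [pvHead n])
            = PySem.List.dedup (ns.map pvHead) := by
          rw [hhead, pv_dedup_append_singleton, if_pos hmem]
        rw [hstep]
        simp only [hsd]
        by_cases hc : c ∈ d.getD t []
        · rw [if_neg (by simpa using hc), ih, htabs]
          apply List.map_congr_left
          intro t' _
          rw [hsufs t']
          by_cases he : t' = t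
          · subst he
            rw [if_pos rfl, pv_dedup_append_singleton,
              if_pos (by rw [hgd] at hc; exact (PySem.List.mem_dedup _ _).mp hc)]
          · simp [he]
        · rw [if_pos (by simpa using hc)]
          rw [PySem.Dict.items_insert_of_contains _ _ hcon, ih, List.map_map, htabs]
          apply List.map_congr_left
          intro t' _
          simp only [Function.comp]
          rw [hsufs t']
          by_cases he : t' = t
          · subst he
            rw [if_pos (by simp : (t == t) = true), if_pos (rfl : t = t), hgd,
              pv_dedup_append_singleton,
              if_neg (by rw [hgd] at hc; exact fun hx => hc ((PySem.List.mem_dedup _ _).mpr hx))]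
          · rw [if_neg (by simpa using he)]
            simp [he]
      · -- fresh table
        have hcon : d.contains t = false := by rw [hcontains]; simp [hmem]
        have hsd : d.setdefault t [] = d.insert t [] :=
          PySem.Dict.setdefault_of_not_contains _ _ hcon
        have hgd : (d.insert t []).getD t [] = [] := PySem.Dict.getD_insert_self d t [] []
        rw [hstep]
        simp only [hsd, hgd]
        rw [if_pos (by simp), PySem.Dict.insert_insert_self,
          PySem.Dict.items_insert_of_not_contains _ _ hcon, ih]
        rw [hhead, pv_dedup_append_singleton, if_neg hmem, List.map_append]
        congr 1
        · apply List.map_congr_left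
          intro t' ht'
          have hne : t' ≠ t := fun he =>
            hmem (he ▸ (PySem.List.mem_dedup _ _).mp ht')
          rw [hsufs t', if_neg hne]
          simp
        · rw [List.map_singleton, hsufs t, if_pos rfl,
            pv_sufs_nil_of_not_mem ns t hmem]
          rfl
    · -- n has no dot
      have hIn : PySem.Str.isIn "." n = false := (pv_isIn_false_iff n).mpr hdot
      have hhead : pvHead n = n := pv_head_no_dot n hdot
      have hstep : pvStepA d n = d.setdefault n [] := by
        unfold pvStepA; rw [if_pos hIn]
      have hsufs : ∀ t', pvSufs (ns ++ [n]) t' = pvSufs ns t' := by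
        intro t'
        rw [pv_sufs_append, hIn]
        simp
      by_cases hmem : n ∈ ns.map pvHead
      · have hcon : d.contains n = true := by rw [hcontains]; simp [hmem]
        rw [hstep, PySem.Dict.setdefault_of_contains _ _ hcon, ih, hhead,
          pv_dedup_append_singleton, if_pos hmem]
        apply List.map_congr_left
        intro t' _
        rw [hsufs t']
      · have hcon : d.contains n = false := by rw [hcontains]; simp [hmem]
        rw [hstep, PySem.Dict.setdefault_of_not_contains _ _ hcon,
          PySem.Dict.items_insert_of_not_contains _ _ hcon, ih, hhead,
          pv_dedup_append_singleton, if_neg hmem, List.map_append]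
        congr 1
        · apply List.map_congr_left
          intro t' _
          rw [hsufs t']
        · rw [List.map_singleton, hsufs n, pv_sufs_nil_of_not_mem ns n hmem]
          rfl

-- ===== VERDICT (by name: the statement is the Claim_ definition above) =====
theorem nodes_to_subgraph_py_spec : Claim_equal_nodes_to_subgraph_py := by
  intro nodes _
  unfold Spec_nodes_to_subgraph_py nodes_to_subgraph_py nodes_to_subgraph_py_alt
  exact pv_fold_items nodes
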